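-- pv_equiv track=rewrite | github.com/ChrisGuerrero7/network_basics | subnetting.py | add_bits
-- ===== SOURCE A (Python) =====
-- def add_bits(binary, borrow_bit, netbit):
--     """
--     This function allows us to add zeros to the octect depending on the borrowed bits.
--     """
--     binary_list = []
--     count = 0
--     for bit in binary:
--         count += 1
--         if count <= borrow_bit:
--             binary_list.append(bit)
--         else:
--             binary_list.append(netbit)
--     return binary_list
-- ===== SOURCE B (Python) =====
-- def add_bits(binary, borrow_bit, netbit):
--     """Keep the first borrow_bit elements, fill the rest with netbit."""
--     k = max(0, min(borrow_bit, len(binary)))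
--     return list(binary[:k]) + [netbit] * (len(binary) - k)
-- ===== Notes on version B (the rewrite author's own statement) =====
-- stated objective: simpler
-- what changed: Replaces the counter loop with length arithmetic: clamp k = max(0, min(borrow_bit, len(binary))) and return the slice binary[:k] concatenated with (len-k) copies of netbit.
import Mathlib
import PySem

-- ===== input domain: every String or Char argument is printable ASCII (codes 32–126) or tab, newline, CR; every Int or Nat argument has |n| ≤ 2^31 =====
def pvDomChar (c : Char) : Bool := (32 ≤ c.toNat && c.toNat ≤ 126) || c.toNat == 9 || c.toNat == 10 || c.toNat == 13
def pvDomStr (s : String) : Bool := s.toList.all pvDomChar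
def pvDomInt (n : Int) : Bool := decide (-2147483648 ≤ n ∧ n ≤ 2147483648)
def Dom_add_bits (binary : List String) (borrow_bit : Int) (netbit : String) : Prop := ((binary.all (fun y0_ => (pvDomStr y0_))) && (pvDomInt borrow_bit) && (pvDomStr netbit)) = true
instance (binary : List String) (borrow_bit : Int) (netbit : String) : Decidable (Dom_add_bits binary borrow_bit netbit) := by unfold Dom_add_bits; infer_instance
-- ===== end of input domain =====

-- B replaces A's counter loop with slice + replicate (length arithmetic); same return value, objective: simpler.
-- ===== PORT A =====
-- loop 'for bit in binary: count += 1; append(bit if count <= borrow_bit else netbit)' as structural recursion on binary carrying count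
def addBitsGo (bits : List String) (count : Int) (borrow_bit : Int) (netbit : String) : List String :=
  match bits with
  | [] => []
  | b :: rest =>
      (if count + 1 ≤ borrow_bit then b else netbit) :: addBitsGo rest (count + 1) borrow_bit netbit

def add_bits (binary : List String) (borrow_bit : Int) (netbit : String) : List String :=
  addBitsGo binary 0 borrow_bit netbit

-- ===== PORT B =====
-- k is clamped into [0, len binary], so the Python slice binary[:k] is List.take k.toNat, exactly
def add_bits_alt (binary : List String) (borrow_bit : Int) (netbit : String) : List String :=
  let k : Int := max 0 (min borrow_bit (binary.length : Int))
  binary.take k.toNat ++ List.replicate (binary.length - k.toNat) netbit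

-- ===== PRECONDITION & SPEC =====
def Spec_add_bits (binary : List String) (borrow_bit : Int) (netbit : String) (out : List String) : Prop := out = add_bits_alt binary borrow_bit netbit
instance (binary : List String) (borrow_bit : Int) (netbit : String) (out : List String) : Decidable (Spec_add_bits binary borrow_bit netbit out) := by unfold Spec_add_bits; infer_instance

-- ===== CLAIM (what is proved, stated in full; the proofs are below) =====
def Claim_equal_add_bits : Prop := ∀ (binary : List String) (borrow_bit : Int) (netbit : String), Dom_add_bits binary borrow_bit netbit → Spec_add_bits binary borrow_bit netbit (add_bits binary borrow_bit netbit)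

-- ===== LEMMAS AND PROOFS =====

-- ===== VERDICT (by name: the statement is the Claim_ definition above) =====
lemma addBitsGo_eq (borrow_bit : Int) (netbit : String) :
    ∀ (bits : List String) (c : Int),
      addBitsGo bits c borrow_bit netbit =
        bits.take (borrow_bit - c).toNat ++ List.replicate (bits.length - (borrow_bit - c).toNat) netbit := by
  intro bits
  induction bits with
  | nil => intro c; simp [addBitsGo]
  | cons b rest ih =>
      intro c
      by_cases h : c + 1 ≤ borrow_bit
      · have h1 : (borrow_bit - c).toNat = ((borrow_bit - (c + 1)).toNat) + 1 := by omega
        simp [addBitsGo, h, h1, ih (c + 1), List.take_succ_cons]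
      · have h0 : (borrow_bit - c).toNat = 0 := by omega
        have h0' : (borrow_bit - (c + 1)).toNat = 0 := by omega
        simp [addBitsGo, h, h0, ih (c + 1), h0', List.replicate_succ]

theorem add_bits_spec : Claim_equal_add_bits := by
  intro binary borrow_bit netbit _
  unfold Spec_add_bits add_bits add_bits_alt
  rw [addBitsGo_eq]
  show _ = List.take _ binary ++ _
  have hk : (max 0 (min borrow_bit (binary.length : Int))).toNat = min (borrow_bit - 0).toNat binary.length := by omega
  rw [hk]
  congr 1
  · rcases Nat.le_total (borrow_bit - 0).toNat binary.length with h | h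
    · rw [Nat.min_eq_left h]
    · rw [Nat.min_eq_right h, List.take_of_length_le h, List.take_length]
  · congr 1; omega
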